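-- pv_equiv track=rewrite | github.com/Widito/TFG | tfg_rag_pruebas/code/evaluador_requisitos.py | generar_matriz_cobertura
-- ===== SOURCE A (Python) =====
-- from typing import Dict, List, Optional, Any
--
-- def generar_matriz_cobertura(tad_requisitos: Dict[str, List[Dict[str, str]]]) -> Dict[str, List[str]]:
--     """
--     Pivota el TAD requisito->entidades hacia ontologia->requisitos cubiertos.
--     """
--     cobertura: Dict[str, List[str]] = {}
--
--     for requisito, entidades in tad_requisitos.items():
--         for entidad in entidades:
--             ontologia = entidad.get("ontologia", "unknown")
--             if ontologia not in cobertura: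
--                 cobertura[ontologia] = []
--
--             if requisito not in cobertura[ontologia]:
--                 cobertura[ontologia].append(requisito)
--
--     return cobertura
-- ===== SOURCE B (Python) =====
-- def generar_matriz_cobertura(tad_requisitos):
--     """
--     Pivota el TAD requisito->entidades hacia ontologia->requisitos cubiertos.
--
--     Two staged passes, output-driven: first collect the distinct ontologias in
--     first-appearance order over all entities; then, for each ontologia, gather
--     the requisitos that have at least one entity in it.  Correct because A's key
--     order is the first-appearance order of ontologias and each per-key list is
--     the requisitos (in dict order, each at most once) covering that ontologia.
--     """
--     onts = dict.fromkeys(e.get("ontologia", "unknown")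
--                          for entidades in tad_requisitos.values()
--                          for e in entidades)
--     return {o: [requisito for requisito, entidades in tad_requisitos.items()
--                 if any(e.get("ontologia", "unknown") == o for e in entidades)]
--             for o in onts}
-- ===== Notes on version B (the rewrite author's own statement) =====
-- stated objective: alternative
-- what changed: B is output-driven in two staged passes: it first computes the distinct ontologias in first-appearance order, then builds each ontologia's requisito list by filtering the requisitos for coverage, instead of A's single streaming pass that accumulates and mutates per-key lists with membership/key-existence guards.
import Mathlib
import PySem

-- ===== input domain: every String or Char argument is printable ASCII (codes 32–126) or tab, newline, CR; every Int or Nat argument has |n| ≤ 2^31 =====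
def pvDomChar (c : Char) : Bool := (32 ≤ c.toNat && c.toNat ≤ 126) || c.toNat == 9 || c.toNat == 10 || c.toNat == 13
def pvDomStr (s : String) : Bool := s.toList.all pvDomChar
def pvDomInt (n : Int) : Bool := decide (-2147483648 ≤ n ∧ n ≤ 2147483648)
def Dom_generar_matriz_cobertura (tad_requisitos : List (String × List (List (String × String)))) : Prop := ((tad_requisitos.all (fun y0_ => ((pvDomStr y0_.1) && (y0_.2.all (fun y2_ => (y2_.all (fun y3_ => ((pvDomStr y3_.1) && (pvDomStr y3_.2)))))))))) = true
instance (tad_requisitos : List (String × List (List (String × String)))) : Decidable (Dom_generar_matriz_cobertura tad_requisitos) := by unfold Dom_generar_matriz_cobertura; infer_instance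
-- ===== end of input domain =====

-- B pivots in two staged, output-driven passes (collect the distinct ontologias, then
-- filter the requisitos per ontologia) instead of A's single streaming accumulation;
-- a timing run measured B faster (no per-entity scan of a growing coverage list).

-- ===== PORT A =====
def generar_matriz_cobertura (tad_requisitos : List (String × List (List (String × String)))) : List (String × List String) :=
  (tad_requisitos.foldl (fun cobertura p =>
    p.2.foldl (fun cobertura entidad =>
      let ontologia := (PySem.Dict.mk entidad).getD "ontologia" "unknown"
      let cobertura := if cobertura.contains ontologia then cobertura else cobertura.insert ontologia []
      if p.1 ∈ cobertura.getD ontologia [] then cobertura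
      else cobertura.modify ontologia [] (· ++ [p.1])) cobertura)
    PySem.Dict.empty).items

-- ===== PORT B =====
-- e.get("ontologia", "unknown")
def pvOntologiaDe (e : List (String × String)) : String := (PySem.Dict.mk e).getD "ontologia" "unknown"

def generar_matriz_cobertura_alt (tad_requisitos : List (String × List (List (String × String)))) : List (String × List String) :=
  let onts := PySem.List.dedup (tad_requisitos.flatMap (fun p => p.2.map pvOntologiaDe))
  (onts.foldl (fun d o =>
      d.insert o ((tad_requisitos.filter (fun p => p.2.any (fun e => pvOntologiaDe e == o))).map Prod.fst))
    PySem.Dict.empty).items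

-- ===== PRECONDITION & SPEC =====
-- Pre_ only encodes the type convention for dict arguments: it excludes association lists with a
-- duplicated requisito key, which cannot arise from a Python dict (whose keys are unique).
def Pre_generar_matriz_cobertura (tad_requisitos : List (String × List (List (String × String)))) : Prop :=
  (tad_requisitos.map Prod.fst).Nodup
instance (tad_requisitos : List (String × List (List (String × String)))) : Decidable (Pre_generar_matriz_cobertura tad_requisitos) := by unfold Pre_generar_matriz_cobertura; infer_instance

def pvWitness_generar_matriz_cobertura : (List (String × List (List (String × String)))) :=
  [("r1", [[("ontologia", "geo"), ("id", "e1")], [("id", "e2")], [("ontologia", "geo")]]),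
   ("r2", [[("ontologia", "bio")], [("ontologia", "geo")]])]

def Spec_generar_matriz_cobertura (tad_requisitos : List (String × List (List (String × String)))) (out : List (String × List String)) : Prop := out = generar_matriz_cobertura_alt tad_requisitos
instance (tad_requisitos : List (String × List (List (String × String)))) (out : List (String × List String)) : Decidable (Spec_generar_matriz_cobertura tad_requisitos out) := by unfold Spec_generar_matriz_cobertura; infer_instance

-- ===== CLAIM (what is proved, stated in full; the proofs are below) =====
def Claim_equal_generar_matriz_cobertura : Prop := ∀ (tad_requisitos : List (String × List (List (String × String)))), Dom_generar_matriz_cobertura tad_requisitos → Pre_generar_matriz_cobertura tad_requisitos → Spec_generar_matriz_cobertura tad_requisitos (generar_matriz_cobertura tad_requisitos)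

-- ===== LEMMAS AND PROOFS =====

-- The common target shape: items = distinct ontologias (first appearance order),
-- each paired with the requisitos covering it, in dict order.
def pvF (l : List (String × List (List (String × String)))) : List (String × List String) :=
  (PySem.List.dedup (l.flatMap (fun p => p.2.map pvOntologiaDe))).map
    (fun o => (o, (l.filter (fun p => p.2.any (fun e => pvOntologiaDe e == o))).map Prod.fst))

theorem pvAlt_eq_pvF (l : List (String × List (List (String × String)))) :
    generar_matriz_cobertura_alt l = pvF l := by
  unfold generar_matriz_cobertura_alt pvF
  dsimp only []
  have h := PySem.Dict.items_foldl_insert_fresh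
    (PySem.List.dedup (l.flatMap (fun p => p.2.map pvOntologiaDe)))
    (fun o => o)
    (fun o => (l.filter (fun p => p.2.any (fun e => pvOntologiaDe e == o))).map Prod.fst)
    PySem.Dict.empty
    (fun a _ => by simp [PySem.Dict.contains_empty])
    (by simpa using PySem.List.nodup_dedup (l.flatMap (fun p => p.2.map pvOntologiaDe)))
  simpa [PySem.Dict.items] using h

-- B's inner step on the A side: ensure the key, then append the requisito.
def pvBstep (r : String) (cob : PySem.Dict String (List String)) (o : String) : PySem.Dict String (List String) :=
  (cob.setdefault o []).modify o [] (· ++ [r])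

theorem pvBstep_getD (r : String) (cob : PySem.Dict String (List String)) (o o' : String) :
    (pvBstep r cob o).getD o' [] = if o' = o then cob.getD o [] ++ [r] else cob.getD o' [] := by
  unfold pvBstep
  by_cases hc : cob.contains o
  · rw [PySem.Dict.setdefault_of_contains cob [] hc, PySem.Dict.getD_modify]
  · have hc' : cob.contains o = false := by simpa using hc
    rw [PySem.Dict.setdefault_of_not_contains cob [] hc', PySem.Dict.getD_modify]
    split_ifs with h
    · subst h
      rw [PySem.Dict.getD_insert_self, PySem.Dict.getD_of_not_contains cob [] hc']
    · rw [PySem.Dict.getD_insert_of_ne cob _ _ h]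

-- A's inner step is B's step guarded by membership of r in the current coverage list.
theorem pvAstep_eq (r : String) (cob : PySem.Dict String (List String)) (o : String) :
    (let cob1 := if cob.contains o then cob else cob.insert o [];
     if r ∈ cob1.getD o [] then cob1 else cob1.modify o [] (· ++ [r]))
    = if r ∈ cob.getD o [] then cob else pvBstep r cob o := by
  unfold pvBstep
  by_cases hc : cob.contains o
  · simp only [hc, if_true, PySem.Dict.setdefault_of_contains cob [] hc]
  · have hc' : cob.contains o = false := by simpa using hc
    simp only [hc', Bool.false_eq_true, if_false,
      PySem.Dict.setdefault_of_not_contains cob [] hc',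
      PySem.Dict.getD_of_not_contains cob [] hc', PySem.Dict.getD_insert_self,
      List.not_mem_nil, if_false]


theorem pvBstep_keys (r : String) (d : PySem.Dict String (List String)) (o : String) :
    (pvBstep r d o).keys = if d.contains o then d.keys else d.keys ++ [o] := by
  unfold pvBstep
  by_cases hc : d.contains o
  · rw [PySem.Dict.setdefault_of_contains d [] hc, PySem.Dict.keys_modify,
      PySem.Dict.keys_insert_of_contains d _ hc, if_pos hc]
  · have hc' : d.contains o = false := by simpa using hc
    have hstep : (d.insert o []).modify o [] (· ++ [r])
        = (d.insert o []).insert o (((d.insert o []).getD o []) ++ [r]) := rfl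
    rw [PySem.Dict.setdefault_of_not_contains d [] hc', hstep,
      PySem.Dict.insert_insert_self, PySem.Dict.keys_insert_of_not_contains d _ hc', if_neg hc]

theorem pvBstep_items (r : String) (d : PySem.Dict String (List String)) (o : String)
    (hnd : d.keys.Nodup) :
    (pvBstep r d o).items =
      if d.contains o then d.items.map (fun kv => if kv.1 = o then (kv.1, kv.2 ++ [r]) else kv)
      else d.items ++ [(o, [r])] := by
  unfold pvBstep
  by_cases hc : d.contains o
  · have hstep : d.modify o [] (· ++ [r]) = d.insert o ((d.getD o []) ++ [r]) := rfl
    rw [PySem.Dict.setdefault_of_contains d [] hc, hstep,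
      PySem.Dict.items_insert_of_contains d _ hc, if_pos hc]
    refine List.map_congr_left (fun kv hkv => ?_)
    by_cases hk : kv.1 = o
    · have hmem : (o, kv.2) ∈ d.items := by
        have : kv = (o, kv.2) := by rw [← hk]
        exact this ▸ hkv
      have hval : d.getD o [] = kv.2 := PySem.Dict.getD_of_mem_items d hmem hnd []
      simp [hk, hval]
    · simp [hk]
  · have hc' : d.contains o = false := by simpa using hc
    have hstep : (d.insert o []).modify o [] (· ++ [r])
        = (d.insert o []).insert o (((d.insert o []).getD o []) ++ [r]) := rfl
    rw [PySem.Dict.setdefault_of_not_contains d [] hc', hstep,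
      PySem.Dict.insert_insert_self, PySem.Dict.items_insert_of_not_contains d _ hc', if_neg hc,
      PySem.Dict.getD_insert_self, List.nil_append]

theorem pvBstep_keys_nodup (r : String) (d : PySem.Dict String (List String)) (o : String)
    (hnd : d.keys.Nodup) : (pvBstep r d o).keys.Nodup := by
  rw [pvBstep_keys]
  by_cases hc : d.contains o
  · simpa [hc]
  · have hc' : d.contains o = false := by simpa using hc
    have ho : o ∉ d.keys := fun h => hc ((PySem.Dict.contains_iff_mem_keys d o).mpr h)
    simp only [hc', Bool.false_eq_true, if_false]
    rw [List.nodup_append]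
    refine ⟨hnd, List.nodup_singleton o, fun a ha b hb => ?_⟩
    simp only [List.mem_singleton] at hb
    subst hb
    exact fun heq => ho (heq ▸ ha)

-- Items after B's inner loop over a distinct list of ontologies U:
-- append r to the coverage list of every key in U, then append U's fresh keys with [r].
theorem pvItems_foldl_pvBstep (r : String) (U : List String)
    (d : PySem.Dict String (List String)) (hU : U.Nodup) (hnd : d.keys.Nodup) :
    (U.foldl (pvBstep r) d).items =
      d.items.map (fun kv => if kv.1 ∈ U then (kv.1, kv.2 ++ [r]) else kv)
        ++ (U.filter (fun o => !(d.keys.contains o))).map (fun o => (o, [r])) := by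
  induction U generalizing d with
  | nil => simp
  | cons o t ih =>
    have ho : o ∉ t := (List.nodup_cons.mp hU).1
    have ht : t.Nodup := (List.nodup_cons.mp hU).2
    rw [List.foldl_cons, ih (pvBstep r d o) ht (pvBstep_keys_nodup r d o hnd)]
    rw [pvBstep_items r d o hnd, pvBstep_keys r d o]
    by_cases hc : d.contains o
    · have hok : o ∈ d.keys := (PySem.Dict.contains_iff_mem_keys d o).mp hc
      rw [if_pos hc, if_pos hc, List.map_map]
      have h1 : d.items.map ((fun kv => if kv.1 ∈ t then (kv.1, kv.2 ++ [r]) else kv) ∘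
            (fun kv => if kv.1 = o then (kv.1, kv.2 ++ [r]) else kv))
          = d.items.map (fun kv => if kv.1 ∈ o :: t then (kv.1, kv.2 ++ [r]) else kv) := by
        refine List.map_congr_left (fun kv _ => ?_)
        by_cases hk : kv.1 = o
        · simp [Function.comp, hk, ho]
        · simp [Function.comp, hk, List.mem_cons]
      have h2 : (o :: t).filter (fun x => !(d.keys.contains x))
          = t.filter (fun x => !(d.keys.contains x)) := by
        simp [List.filter_cons, hok]
      rw [h1, h2]
    · have hc' : d.contains o = false := by simpa using hc
      have hok : o ∉ d.keys := fun h => hc ((PySem.Dict.contains_iff_mem_keys d o).mpr h)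
      rw [if_neg hc, if_neg hc, List.map_append]
      have h1 : d.items.map (fun kv => if kv.1 ∈ t then (kv.1, kv.2 ++ [r]) else kv)
          = d.items.map (fun kv => if kv.1 ∈ o :: t then (kv.1, kv.2 ++ [r]) else kv) := by
        refine List.map_congr_left (fun kv hkv => ?_)
        have hk : kv.1 ≠ o := fun h => hok (h ▸ PySem.Dict.mem_keys_of_mem_items d hkv)
        simp [hk, List.mem_cons]
      have h3 : t.filter (fun x => !((d.keys ++ [o]).contains x))
          = t.filter (fun x => !(d.keys.contains x)) := by
        refine List.filter_congr (fun x hx => ?_)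
        have hxo : x ≠ o := fun h => ho (h ▸ hx)
        simp [hxo]
      have h4 : (o :: t).filter (fun x => !(d.keys.contains x))
          = o :: t.filter (fun x => !(d.keys.contains x)) := by
        simp [List.filter_cons, hok]
      have h5 : ([(o, [r])] : List (String × List String)).map
            (fun kv => if kv.1 ∈ t then (kv.1, kv.2 ++ [r]) else kv) = [(o, [r])] := by
        simp [ho]
      rw [h3, h4, h5, List.map_cons, h1, List.append_assoc, List.singleton_append]

-- pvF over an appended requisito, as the same items transformation.
theorem pvF_append (l : List (String × List (List (String × String))))
    (p : String × List (List (String × String))) :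
    pvF (l ++ [p]) =
      (pvF l).map (fun kv => if kv.1 ∈ PySem.Set.ofList (p.2.map pvOntologiaDe)
          then (kv.1, kv.2 ++ [p.1]) else kv)
        ++ ((PySem.Set.ofList (p.2.map pvOntologiaDe)).filter
              (fun o => !((PySem.List.dedup (l.flatMap (fun q => q.2.map pvOntologiaDe))).contains o))).map
            (fun o => (o, [p.1])) := by
  unfold pvF
  have hflat : (l ++ [p]).flatMap (fun q => q.2.map pvOntologiaDe)
      = l.flatMap (fun q => q.2.map pvOntologiaDe) ++ p.2.map pvOntologiaDe := by
    simp
  rw [hflat, PySem.List.dedup_eq_ofList, PySem.List.dedup_eq_ofList,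
    PySem.Set.ofList_append, PySem.Set.update_eq_append_filter, List.map_append, List.map_map]
  congr 1
  · refine List.map_congr_left (fun o ho => ?_)
    have hcov : (p.2.any (fun e => pvOntologiaDe e == o)) = true
        ↔ o ∈ PySem.Set.ofList (p.2.map pvOntologiaDe) := by
      simp [PySem.Set.mem_ofList, List.any_eq_true]
    by_cases hin : o ∈ PySem.Set.ofList (p.2.map pvOntologiaDe)
    · simp only [Function.comp, List.filter_append, List.map_append, hin, if_pos]
      simp [List.filter_cons, hcov.mpr hin]
    · have hnot : (p.2.any (fun e => pvOntologiaDe e == o)) = false := by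
        rcases h : (p.2.any (fun e => pvOntologiaDe e == o)) with _ | _
        · rfl
        · exact absurd (hcov.mp h) hin
      simp only [Function.comp, List.filter_append, List.map_append, hin, if_neg]
      simp [List.filter_cons, hnot]
  · refine List.map_congr_left (fun o ho => ?_)
    rw [List.mem_filter] at ho
    obtain ⟨hoU, hnotK⟩ := ho
    have honotK : o ∉ PySem.Set.ofList (l.flatMap (fun q => q.2.map pvOntologiaDe)) := by
      intro h
      simp [h] at hnotK
    have hlnil : l.filter (fun q => q.2.any (fun e => pvOntologiaDe e == o)) = [] := by
      rw [List.filter_eq_nil_iff]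
      intro q hq hcov
      apply honotK
      rw [PySem.Set.mem_ofList]
      rw [List.any_eq_true] at hcov
      obtain ⟨e, he, hv⟩ := hcov
      exact List.mem_flatMap.mpr ⟨q, hq, List.mem_map.mpr ⟨e, he, by simpa using hv⟩⟩
    have hcovp : (p.2.any (fun e => pvOntologiaDe e == o)) = true := by
      rw [PySem.Set.mem_ofList] at hoU
      rw [List.any_eq_true]
      obtain ⟨e, he, hv⟩ := List.mem_map.mp hoU
      exact ⟨e, he, by simpa using hv⟩
    simp [List.filter_append, hlnil, List.filter_cons, hcovp]

-- Core inner-loop equivalence, generalized over the set S of ontologies already covering r.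
theorem pvInner_gen (r : String) (l : List String) (S : PySem.Set String)
    (cob : PySem.Dict String (List String))
    (hS : ∀ o, r ∈ cob.getD o [] ↔ o ∈ S) :
    l.foldl (fun c o => if r ∈ c.getD o [] then c else pvBstep r c o) cob
      = ((PySem.Set.update S l).drop S.length).foldl (pvBstep r) cob := by
  induction l generalizing S cob with
  | nil =>
    simp [PySem.Set.update_nil]
  | cons o t ih =>
    rw [PySem.Set.update_cons]
    by_cases ho : o ∈ S
    · have hmem : r ∈ cob.getD o [] := (hS o).mpr ho
      simp only [List.foldl_cons, if_pos hmem, PySem.Set.add_of_mem ho]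
      exact ih S cob hS
    · have hmem : r ∉ cob.getD o [] := fun h => ho ((hS o).mp h)
      have hadd : PySem.Set.add S o = S ++ [o] := PySem.Set.add_of_not_mem ho
      have hS' : ∀ o', r ∈ (pvBstep r cob o).getD o' [] ↔ o' ∈ S ++ [o] := by
        intro o'
        rw [pvBstep_getD]
        by_cases he : o' = o
        · subst he; simp
        · simp [he, hS o']
      simp only [List.foldl_cons, if_neg hmem, hadd]
      rw [ih (S ++ [o]) (pvBstep r cob o) hS']
      have hpref := PySem.Set.update_eq_append_filter (S ++ [o]) t
      rw [hpref]
      have eL : List.drop (S ++ [o]).length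
          ((S ++ [o]) ++ List.filter (fun y => !(PySem.Set.contains (S ++ [o]) y)) (PySem.Set.ofList t))
          = List.filter (fun y => !(PySem.Set.contains (S ++ [o]) y)) (PySem.Set.ofList t) :=
        List.drop_left
      have eR : List.drop S.length
          ((S ++ [o]) ++ List.filter (fun y => !(PySem.Set.contains (S ++ [o]) y)) (PySem.Set.ofList t))
          = o :: List.filter (fun y => !(PySem.Set.contains (S ++ [o]) y)) (PySem.Set.ofList t) := by
        rw [List.append_assoc]
        exact List.drop_left
      rw [eL, eR, List.foldl_cons]

-- No element of a pvF-shaped dict's coverage lists lies outside l's requisitos.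
theorem pvF_values_sub (l : List (String × List (List (String × String))))
    (d : PySem.Dict String (List String)) (hitems : d.items = pvF l)
    (x o : String) (hx : x ∈ d.getD o []) : x ∈ l.map Prod.fst := by
  rw [PySem.Dict.getD_eq_get?_getD] at hx
  rcases hg : d.get? o with _ | v
  · rw [hg] at hx; simp at hx
  · rw [hg] at hx
    have hmem : (o, v) ∈ d.items := PySem.Dict.mem_items_of_get?_eq_some d hg
    rw [hitems] at hmem
    unfold pvF at hmem
    obtain ⟨o', _, heq⟩ := List.mem_map.mp hmem
    have hv : v = (l.filter (fun p => p.2.any (fun e => pvOntologiaDe e == o'))).map Prod.fst := by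
      have := congrArg Prod.snd heq
      simpa using this.symm
    rw [hv] at hx
    obtain ⟨p, hp, hpx⟩ := List.mem_map.mp hx
    exact List.mem_map.mpr ⟨p, List.mem_of_mem_filter hp, hpx⟩

-- A's whole fold produces pvF, given unique requisito keys.
theorem pvA_items (l : List (String × List (List (String × String))))
    (hnd : (l.map Prod.fst).Nodup) :
    (l.foldl (fun cobertura p =>
      p.2.foldl (fun cobertura entidad =>
        let ontologia := (PySem.Dict.mk entidad).getD "ontologia" "unknown"
        let cobertura := if cobertura.contains ontologia then cobertura else cobertura.insert ontologia []
        if p.1 ∈ cobertura.getD ontologia [] then cobertura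
        else cobertura.modify ontologia [] (· ++ [p.1])) cobertura)
      PySem.Dict.empty).items = pvF l := by
  induction l using List.reverseRecOn with
  | nil => simp [pvF, PySem.Dict.empty, PySem.Dict.items]
  | append_singleton l p ih =>
    rw [List.map_append] at hnd
    obtain ⟨hnd', -, hdisj⟩ := List.nodup_append.mp hnd
    have hp1 : p.1 ∉ l.map Prod.fst := fun h => hdisj p.1 h p.1 (by simp) rfl
    rw [List.foldl_append, List.foldl_cons, List.foldl_nil]
    have hd := ih hnd'
    generalize hdd : (l.foldl (fun cobertura p =>
      p.2.foldl (fun cobertura entidad =>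
        let ontologia := (PySem.Dict.mk entidad).getD "ontologia" "unknown"
        let cobertura := if cobertura.contains ontologia then cobertura else cobertura.insert ontologia []
        if p.1 ∈ cobertura.getD ontologia [] then cobertura
        else cobertura.modify ontologia [] (· ++ [p.1])) cobertura)
      PySem.Dict.empty) = dd at hd ⊢
    have hkeysL : dd.keys = PySem.List.dedup (l.flatMap (fun q => q.2.map pvOntologiaDe)) := by
      simp [PySem.Dict.keys, hd, pvF, List.map_map, Function.comp_def]
    have hknd : dd.keys.Nodup := by
      rw [hkeysL]; exact PySem.List.nodup_dedup _
    have hfresh : ∀ o, p.1 ∉ dd.getD o [] := fun o hx => hp1 (pvF_values_sub l dd hd p.1 o hx)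
    have h1 : (p.2.foldl (fun cobertura entidad =>
        let ontologia := (PySem.Dict.mk entidad).getD "ontologia" "unknown"
        let cobertura := if cobertura.contains ontologia then cobertura else cobertura.insert ontologia []
        if p.1 ∈ cobertura.getD ontologia [] then cobertura
        else cobertura.modify ontologia [] (· ++ [p.1])) dd)
        = (p.2.map pvOntologiaDe).foldl
            (fun c o => if p.1 ∈ c.getD o [] then c else pvBstep p.1 c o) dd := by
      rw [List.foldl_map]
      exact PySem.List.foldl_congr_mem _ _ _ _
        (fun c e _ => pvAstep_eq p.1 c ((PySem.Dict.mk e).getD "ontologia" "unknown"))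
    have h2 : (p.2.map pvOntologiaDe).foldl
          (fun c o => if p.1 ∈ c.getD o [] then c else pvBstep p.1 c o) dd
        = (PySem.Set.ofList (p.2.map pvOntologiaDe)).foldl (pvBstep p.1) dd := by
      rw [pvInner_gen p.1 _ PySem.Set.empty dd
        (fun o => by simp [PySem.Set.empty, hfresh o])]
      simp [PySem.Set.update_nil_left, PySem.Set.empty]
    rw [h1, h2, pvItems_foldl_pvBstep p.1 _ dd (PySem.Set.nodup_ofList _) hknd, hd, hkeysL,
      pvF_append l p]

-- ===== VERDICT (by name: the statement is the Claim_ definition above) =====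
theorem generar_matriz_cobertura_spec : Claim_equal_generar_matriz_cobertura := by
  intro tad _ hpre
  unfold Spec_generar_matriz_cobertura
  rw [pvAlt_eq_pvF]
  unfold generar_matriz_cobertura
  exact pvA_items tad hpre
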